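-- pv_equiv track=rewrite | github.com/esteban-de-luca/verificador-cubro | pages/2_Cola_Global.py | _resumen_estados
-- ===== SOURCE A (Python) =====
-- _ORDEN_ESTADOS = ("PENDIENTE", "ADVERTENCIAS", "BLOQUEADO")
--
-- def _resumen_estados(proyectos: list[dict]) -> str:
--     conteo: dict[str, int] = {}
--     for p in proyectos:
--         conteo[p["estado"]] = conteo.get(p["estado"], 0) + 1
--     partes = []
--     for est in _ORDEN_ESTADOS:
--         if est in conteo:
--             partes.append(f"{conteo[est]} {est}")
--     return "  ·  ".join(partes)
-- ===== SOURCE B (Python) =====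
-- _ORDEN_ESTADOS = ("PENDIENTE", "ADVERTENCIAS", "BLOQUEADO")
--
-- def _resumen_estados(proyectos: list[dict]) -> str:
--     partes = []
--     for est in _ORDEN_ESTADOS:
--         n = sum(1 for p in proyectos if p["estado"] == est)
--         if n > 0:
--             partes.append(f"{n} {est}")
--     return "  ·  ".join(partes)
-- ===== Notes on version B (the rewrite author's own statement) =====
-- stated objective: simpler
-- what changed: Replaces the counting dict plus a second pass over the fixed order by a direct per-state count (one filtered scan for each of the three fixed states), with no intermediate index.
import Mathlib
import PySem

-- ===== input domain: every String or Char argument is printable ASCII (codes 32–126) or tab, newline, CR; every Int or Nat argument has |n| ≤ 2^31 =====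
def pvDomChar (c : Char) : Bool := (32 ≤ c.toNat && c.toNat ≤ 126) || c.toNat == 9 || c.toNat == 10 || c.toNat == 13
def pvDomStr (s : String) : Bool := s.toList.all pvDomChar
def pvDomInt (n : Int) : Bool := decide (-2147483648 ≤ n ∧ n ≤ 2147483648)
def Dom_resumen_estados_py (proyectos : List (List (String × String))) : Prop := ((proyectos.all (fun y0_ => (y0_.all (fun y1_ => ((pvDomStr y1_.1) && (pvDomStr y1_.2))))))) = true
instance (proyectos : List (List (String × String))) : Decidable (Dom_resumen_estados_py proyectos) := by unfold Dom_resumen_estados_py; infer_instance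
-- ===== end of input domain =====

-- B drops A's counting dict and instead counts each of the three fixed states by a direct filtered scan (simpler; same O(n) cost).

-- p["estado"] (first-match dict lookup); total form, exact under Pre_ (key present)
def pvEstado (p : List (String × String)) : String := (List.lookup "estado" p).getD ""

-- ===== PORT A =====
def resumen_estados_py (proyectos : List (List (String × String))) : String :=
  let conteo : PySem.Dict String Int :=
    proyectos.foldl (fun d p => d.insert (pvEstado p) (d.getD (pvEstado p) 0 + 1)) PySem.Dict.empty
  let partes : List String :=
    ["PENDIENTE", "ADVERTENCIAS", "BLOQUEADO"].foldl
      (fun partes est =>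
        if conteo.contains est then partes ++ [PySem.Int.toStr (conteo.getD est 0) ++ " " ++ est]
        else partes) []
  PySem.Str.join "  ·  " partes

-- ===== PORT B =====
def resumen_estados_py_alt (proyectos : List (List (String × String))) : String :=
  let partes : List String :=
    ["PENDIENTE", "ADVERTENCIAS", "BLOQUEADO"].foldl
      (fun partes est =>
        let n : Int := proyectos.foldl (fun n p => if pvEstado p == est then n + 1 else n) 0
        if n > 0 then partes ++ [PySem.Int.toStr n ++ " " ++ est]
        else partes) []
  PySem.Str.join "  ·  " partes

-- ===== PRECONDITION & SPEC =====
-- Pre_: every project has the key "estado" (otherwise Python A raises KeyError)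
def Pre_resumen_estados_py (proyectos : List (List (String × String))) : Prop :=
  ∀ p ∈ proyectos, (List.lookup "estado" p).isSome = true
instance (proyectos : List (List (String × String))) : Decidable (Pre_resumen_estados_py proyectos) := by unfold Pre_resumen_estados_py; infer_instance
def pvWitness_resumen_estados_py : (List (List (String × String))) := [[("estado", "PENDIENTE")], [("estado", "BLOQUEADO")]]

def Spec_resumen_estados_py (proyectos : List (List (String × String))) (out : String) : Prop := out = resumen_estados_py_alt proyectos
instance (proyectos : List (List (String × String))) (out : String) : Decidable (Spec_resumen_estados_py proyectos out) := by unfold Spec_resumen_estados_py; infer_instance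

-- ===== CLAIM (what is proved, stated in full; the proofs are below) =====
def Claim_equal_resumen_estados_py : Prop := ∀ (proyectos : List (List (String × String))), Dom_resumen_estados_py proyectos → Pre_resumen_estados_py proyectos → Spec_resumen_estados_py proyectos (resumen_estados_py proyectos)

-- ===== LEMMAS AND PROOFS =====

-- A's dict entry at est is the number of projects in state est
lemma conteo_getD (proyectos : List (List (String × String))) (est : String) :
    (proyectos.foldl (fun d p => d.insert (pvEstado p) (d.getD (pvEstado p) 0 + 1))
        (PySem.Dict.empty : PySem.Dict String Int)).getD est 0
      = ((proyectos.map pvEstado).count est : Int) := by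
  have hfold : proyectos.foldl (fun d p => d.insert (pvEstado p) (d.getD (pvEstado p) 0 + 1))
      (PySem.Dict.empty : PySem.Dict String Int)
      = (proyectos.map pvEstado).foldl (fun d k => d.insert k (d.getD k 0 + 1)) PySem.Dict.empty :=
    by rw [List.foldl_map]
  rw [hfold, PySem.Dict.getD_foldl_insert_add_one]
  simp [PySem.Dict.getD_empty]

-- B's inner loop is the same count
lemma n_eq (proyectos : List (List (String × String))) (est : String) :
    proyectos.foldl (fun n p => if pvEstado p == est then n + 1 else n) (0 : Int)
      = ((proyectos.map pvEstado).count est : Int) := by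
  rw [PySem.List.foldl_if_add_one]
  simp [List.count, List.countP_map, Function.comp_def]

-- A's membership test agrees with B's positivity test
lemma contains_iff (proyectos : List (List (String × String))) (est : String) :
    (proyectos.foldl (fun d p => d.insert (pvEstado p) (d.getD (pvEstado p) 0 + 1))
        (PySem.Dict.empty : PySem.Dict String Int)).contains est
      = decide (0 < ((proyectos.map pvEstado).count est : Int)) := by
  have hfold : proyectos.foldl (fun d p => d.insert (pvEstado p) (d.getD (pvEstado p) 0 + 1))
      (PySem.Dict.empty : PySem.Dict String Int)
      = (proyectos.map pvEstado).foldl (fun d k => d.insert k (d.getD k 0 + 1)) PySem.Dict.empty :=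
    by rw [List.foldl_map]
  rw [hfold, PySem.Dict.foldl_insert_getD_add_one_eq_counter,
      PySem.Dict.contains_counter]
  by_cases h : est ∈ proyectos.map pvEstado
  · simp [List.count_pos_iff.mpr h]
    exact List.mem_map.mp h
  · simp [List.count_eq_zero_of_not_mem h]
    intro x hx hex
    exact h (List.mem_map.mpr ⟨x, hx, hex⟩)

-- per-state step of A equals per-state step of B
lemma step_eq (proyectos : List (List (String × String))) (est : String) (acc : List String) :
    (if (proyectos.foldl (fun d p => d.insert (pvEstado p) (d.getD (pvEstado p) 0 + 1))
          (PySem.Dict.empty : PySem.Dict String Int)).contains est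
      then acc ++ [PySem.Int.toStr ((proyectos.foldl (fun d p => d.insert (pvEstado p) (d.getD (pvEstado p) 0 + 1))
          (PySem.Dict.empty : PySem.Dict String Int)).getD est 0) ++ " " ++ est]
      else acc)
    = (if (proyectos.foldl (fun n p => if pvEstado p == est then n + 1 else n) (0 : Int)) > 0
      then acc ++ [PySem.Int.toStr (proyectos.foldl (fun n p => if pvEstado p == est then n + 1 else n) (0 : Int)) ++ " " ++ est]
      else acc) := by
  rw [conteo_getD, n_eq, contains_iff]
  simp

-- ===== VERDICT (by name: the statement is the Claim_ definition above) =====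
theorem resumen_estados_py_spec : Claim_equal_resumen_estados_py := by
  intro proyectos _ _
  show resumen_estados_py proyectos = resumen_estados_py_alt proyectos
  unfold resumen_estados_py resumen_estados_py_alt
  simp only [List.foldl]
  rw [step_eq, step_eq, step_eq]
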